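-- pv_equiv track=rewrite | github.com/Mikemaranon/Zertan | app/web_server/services_m/question_logic.py | _normalize_drag_drop_entities
-- ===== SOURCE A (Python) =====
-- def _normalize_drag_drop_entities(entries, prefix):
--     normalized = []
--     seen_ids = set()
--     for index, entry in enumerate(entries, start=1):
--         identifier = (entry.get("id") or f"{prefix}-{index}").strip()
--         label = (entry.get("label") or "").strip()
--         if not identifier or not label:
--             continue
--         if identifier in seen_ids:
--             raise ValueError(f"Duplicate {prefix} ids are not allowed in drag and drop questions.")
--         seen_ids.add(identifier)
--         normalized.append({"id": identifier, "label": label})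
--     return normalized
-- ===== SOURCE B (Python) =====
-- def _normalize_drag_drop_entities(entries, prefix):
--     candidates = (
--         {
--             "id": (entry.get("id") or f"{prefix}-{index}").strip(),
--             "label": (entry.get("label") or "").strip(),
--         }
--         for index, entry in enumerate(entries, start=1)
--     )
--     normalized = [e for e in candidates if e["id"] and e["label"]]
--     ids = [e["id"] for e in normalized]
--     if len(ids) != len(set(ids)):
--         raise ValueError(f"Duplicate {prefix} ids are not allowed in drag and drop questions.")
--     return normalized
-- ===== Notes on version B (the rewrite author's own statement) =====
-- stated objective: idiomatic
-- what changed: B normalizes in one comprehension pass (map then filter) and validates id uniqueness in a separate second pass via len(ids) != len(set(ids)), instead of A's single loop interleaving normalization with a mutable seen_ids membership check per iteration.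
import Mathlib
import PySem

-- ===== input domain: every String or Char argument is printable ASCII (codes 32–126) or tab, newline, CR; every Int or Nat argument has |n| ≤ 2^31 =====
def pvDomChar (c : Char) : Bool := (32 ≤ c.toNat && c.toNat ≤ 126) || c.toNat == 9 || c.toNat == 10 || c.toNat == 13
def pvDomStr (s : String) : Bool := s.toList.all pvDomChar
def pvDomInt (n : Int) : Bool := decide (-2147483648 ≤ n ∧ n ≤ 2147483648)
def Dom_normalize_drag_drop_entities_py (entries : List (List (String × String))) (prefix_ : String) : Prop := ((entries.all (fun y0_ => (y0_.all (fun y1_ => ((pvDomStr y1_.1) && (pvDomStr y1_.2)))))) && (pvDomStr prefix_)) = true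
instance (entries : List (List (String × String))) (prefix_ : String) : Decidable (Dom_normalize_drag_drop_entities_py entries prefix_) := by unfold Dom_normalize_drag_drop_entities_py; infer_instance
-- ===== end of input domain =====

-- B re-decomposes A's single stateful loop into a normalization comprehension followed by a
-- separate uniqueness check (len(ids) != len(set(ids))); same values, objective: idiomatic.

-- identifier = (entry.get("id") or f"{prefix}-{index}").strip()  (shared per-entry arithmetic)
def pvIdent (prefix_ : String) (i : Int) (entry : List (String × String)) : String :=
  let rawId := (PySem.Dict.mk entry).getD "id" ""
  PySem.Str.strip (if rawId = "" then prefix_ ++ "-" ++ PySem.Int.toStr i else rawId)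

-- label = (entry.get("label") or "").strip()
def pvLabel (entry : List (String × String)) : String :=
  PySem.Str.strip ((PySem.Dict.mk entry).getD "label" "")

-- ===== PORT A =====
-- the for-loop over enumerate(entries, 1) with accumulator (normalized, seen_ids);
-- the 'raise ValueError' branch (duplicate id) is outside Pre_, the state is returned unchanged there
def normalize_drag_drop_entities_py (entries : List (List (String × String))) (prefix_ : String) : List (List (String × String)) :=
  ((PySem.List.enumerate entries 1).foldl
    (fun (st : List (List (String × String)) × PySem.Set String) p =>
      let identifier := pvIdent prefix_ p.1 p.2
      let label := pvLabel p.2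
      if identifier = "" ∨ label = "" then st
      else if PySem.Set.contains st.2 identifier then st  -- Python: raise ValueError (excluded by Pre_)
      else (st.1 ++ [[("id", identifier), ("label", label)]], PySem.Set.add st.2 identifier))
    ([], PySem.Set.empty)).1

-- ===== PORT B =====
-- candidate dict for one (index, entry) pair of the generator expression
def pvCand (prefix_ : String) (p : Int × List (String × String)) : List (String × String) :=
  [("id", pvIdent prefix_ p.1 p.2), ("label", pvLabel p.2)]

-- pass 1: map the generator then filter on e["id"] and e["label"]; pass 2: the duplicate check
-- only raises ValueError (excluded by Pre_), so the returned value is 'normalized'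
def normalize_drag_drop_entities_py_alt (entries : List (List (String × String))) (prefix_ : String) : List (List (String × String)) :=
  ((PySem.List.enumerate entries 1).map (pvCand prefix_)).filter
    (fun e => !((PySem.Dict.mk e).getD "id" "" = "") && !((PySem.Dict.mk e).getD "label" "" = ""))

-- ===== PRECONDITION & SPEC =====
-- the ids (after fallback and strip) of the entries that survive the emptiness filter
def pvSurvIds (prefix_ : String) : Int → List (List (String × String)) → List String
  | _, [] => []
  | i, e :: rest =>
    if pvIdent prefix_ i e ≠ "" ∧ pvLabel e ≠ "" then
      pvIdent prefix_ i e :: pvSurvIds prefix_ (i + 1) rest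
    else pvSurvIds prefix_ (i + 1) rest

-- Pre_ excludes exactly the inputs with a duplicate surviving id, on which both A and B raise ValueError
def Pre_normalize_drag_drop_entities_py (entries : List (List (String × String))) (prefix_ : String) : Prop :=
  (pvSurvIds prefix_ 1 entries).Nodup
instance (entries : List (List (String × String))) (prefix_ : String) : Decidable (Pre_normalize_drag_drop_entities_py entries prefix_) := by unfold Pre_normalize_drag_drop_entities_py; infer_instance

def pvWitness_normalize_drag_drop_entities_py : (List (List (String × String))) × String :=
  ([[("id", "x"), ("label", " l ")], [("label", "m")]], "q")

def Spec_normalize_drag_drop_entities_py (entries : List (List (String × String))) (prefix_ : String) (out : List (List (String × String))) : Prop := out = normalize_drag_drop_entities_py_alt entries prefix_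
instance (entries : List (List (String × String))) (prefix_ : String) (out : List (List (String × String))) : Decidable (Spec_normalize_drag_drop_entities_py entries prefix_ out) := by unfold Spec_normalize_drag_drop_entities_py; infer_instance

-- ===== CLAIM (what is proved, stated in full; the proofs are below) =====
def Claim_equal_normalize_drag_drop_entities_py : Prop := ∀ (entries : List (List (String × String))) (prefix_ : String), Dom_normalize_drag_drop_entities_py entries prefix_ → Pre_normalize_drag_drop_entities_py entries prefix_ → Spec_normalize_drag_drop_entities_py entries prefix_ (normalize_drag_drop_entities_py entries prefix_)

-- ===== LEMMAS AND PROOFS =====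

-- B's map-then-filter, computed structurally
theorem pvAlt_eq_surv (prefix_ : String) (entries : List (List (String × String))) (i : Int) :
    ((PySem.List.enumerate entries i).map (pvCand prefix_)).filter
      (fun e => !((PySem.Dict.mk e).getD "id" "" = "") && !((PySem.Dict.mk e).getD "label" "" = "")) =
    (PySem.List.enumerate entries i).foldr
      (fun p acc => if pvIdent prefix_ p.1 p.2 ≠ "" ∧ pvLabel p.2 ≠ "" then pvCand prefix_ p :: acc else acc) [] := by
  induction entries generalizing i with
  | nil => simp [PySem.List.enumerate_nil]
  | cons e rest ih =>
    rw [PySem.List.enumerate_cons]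
    simp only [List.map_cons, List.filter_cons, List.foldr_cons, ih]
    have hid : (PySem.Dict.mk (pvCand prefix_ (i, e))).getD "id" "" = pvIdent prefix_ i e := by
      simp [pvCand, PySem.Dict.getD, PySem.Dict.get?_mk_cons]
    have hlab : (PySem.Dict.mk (pvCand prefix_ (i, e))).getD "label" "" = pvLabel e := by
      simp [pvCand, PySem.Dict.getD, PySem.Dict.get?_mk_cons]
    simp only [hid, hlab]
    by_cases h1 : pvIdent prefix_ i e = "" <;> by_cases h2 : pvLabel e = "" <;>
      simp [h1, h2]

-- A's loop: under the Nodup precondition (and a seen set disjoint from the remaining surviving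
-- ids) the duplicate branch never fires and the fold appends exactly B's surviving entries
theorem pvA_loop (prefix_ : String) (entries : List (List (String × String))) :
    ∀ (i : Int) (acc : List (List (String × String))) (seen : PySem.Set String),
      (pvSurvIds prefix_ i entries).Nodup →
      (∀ s ∈ pvSurvIds prefix_ i entries, ¬ s ∈ seen) →
      ((PySem.List.enumerate entries i).foldl
        (fun (st : List (List (String × String)) × PySem.Set String) p =>
          let identifier := pvIdent prefix_ p.1 p.2
          let label := pvLabel p.2
          if identifier = "" ∨ label = "" then st
          else if PySem.Set.contains st.2 identifier then st
          else (st.1 ++ [[("id", identifier), ("label", label)]], PySem.Set.add st.2 identifier))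
        (acc, seen)).1 =
      acc ++ (PySem.List.enumerate entries i).foldr
        (fun p bcc => if pvIdent prefix_ p.1 p.2 ≠ "" ∧ pvLabel p.2 ≠ "" then pvCand prefix_ p :: bcc else bcc) [] := by
  induction entries with
  | nil => intro i acc seen _ _; simp [PySem.List.enumerate_nil]
  | cons e rest ih =>
    intro i acc seen hnd hdis
    rw [PySem.List.enumerate_cons]
    simp only [List.foldl_cons, List.foldr_cons]
    by_cases h1 : pvIdent prefix_ i e = "" <;> by_cases h2 : pvLabel e = ""
    · have hsurv : pvSurvIds prefix_ i (e :: rest) = pvSurvIds prefix_ (i + 1) rest := by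
        simp [pvSurvIds, h1]
      rw [hsurv] at hnd hdis
      simp only [h1, h2]
      simpa [h1] using ih (i + 1) acc seen hnd hdis
    · have hsurv : pvSurvIds prefix_ i (e :: rest) = pvSurvIds prefix_ (i + 1) rest := by
        simp [pvSurvIds, h1]
      rw [hsurv] at hnd hdis
      simp only [if_pos (Or.inl h1)]
      simpa [h1] using ih (i + 1) acc seen hnd hdis
    · have hsurv : pvSurvIds prefix_ i (e :: rest) = pvSurvIds prefix_ (i + 1) rest := by
        simp [pvSurvIds, h1, h2]
      rw [hsurv] at hnd hdis
      simp only [if_pos (Or.inr h2)]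
      simpa [h2] using ih (i + 1) acc seen hnd hdis
    · -- surviving entry: id nonempty, label nonempty
      have hsurv : pvSurvIds prefix_ i (e :: rest) =
          pvIdent prefix_ i e :: pvSurvIds prefix_ (i + 1) rest := by
        simp [pvSurvIds, h1, h2]
      rw [hsurv] at hnd hdis
      have hnotseen : ¬ pvIdent prefix_ i e ∈ seen := hdis _ (List.mem_cons_self ..)
      have hcont : PySem.Set.contains seen (pvIdent prefix_ i e) = false := by
        by_contra h
        exact hnotseen ((PySem.Set.contains_iff _ _).mp (by revert h; cases PySem.Set.contains seen (pvIdent prefix_ i e) <;> simp))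
      have hnd' : (pvSurvIds prefix_ (i + 1) rest).Nodup := hnd.of_cons
      have hnotin : pvIdent prefix_ i e ∉ pvSurvIds prefix_ (i + 1) rest :=
        (List.nodup_cons.mp hnd).1
      have hdis' : ∀ s ∈ pvSurvIds prefix_ (i + 1) rest,
          ¬ s ∈ PySem.Set.add seen (pvIdent prefix_ i e) := by
        intro s hs hmem
        rcases (PySem.Set.mem_add _ _ _).mp hmem with h | h
        · exact hdis s (List.mem_cons_of_mem _ hs) h
        · exact hnotin (h ▸ hs)
      simp only [h1, h2, hcont]
      rw [if_neg (by simp), if_neg (by simp)]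
      rw [ih (i + 1) (acc ++ [[("id", pvIdent prefix_ i e), ("label", pvLabel e)]])
            (PySem.Set.add seen (pvIdent prefix_ i e)) hnd' hdis']
      simp [pvCand, h1, h2]

-- ===== VERDICT (by name: the statement is the Claim_ definition above) =====
theorem normalize_drag_drop_entities_py_spec : Claim_equal_normalize_drag_drop_entities_py := by
  intro entries prefix_ _ hpre
  unfold Spec_normalize_drag_drop_entities_py normalize_drag_drop_entities_py normalize_drag_drop_entities_py_alt
  rw [pvAlt_eq_surv]
  simpa using pvA_loop prefix_ entries 1 [] PySem.Set.empty hpre (by simp [PySem.Set.empty])
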